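-- pv_equiv track=rewrite | github.com/Rubenssio/HTI-2-Practical-1-Ruben-Petrosyan | Homework_8/utils.py | odd_gen
-- ===== SOURCE A (Python) =====
-- def all_odd_digits(num):
--     """
--     Checks whether all the digits of the number are odd
--
--     Parameters
--     ----------
--     num : int
--         the number to check
--
--     Returns
--     -------
--     bool
--         True, if all digits in the number are odd
--         False, if number has one or more even digits
--     """
--
--     for char in str(num):
--         if int(char) % 2 == 0:
--             return False
--     return True
--
-- def odd_gen(start, stop):
--     """
--     Generates numbers between start and stop (noninclusive)
--     consisting of only even digits
--
--     Parameters
--     ----------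
--     start : int
--         the starting point of the sequence
--     stop : int
--         the end of the sequence (noninclusive)
--
--     Yields
--     ------
--     int
--         next number between start and stop (noninclusive)
--         consisting of only even digits
--     """
--
--     if start % 2 == 0:
--         current_num = start + 1
--     else:
--         current_num = start
--
--     while current_num < stop:
--         if all_odd_digits(current_num):
--             yield current_num
--         current_num += 2
-- ===== SOURCE B (Python) =====
-- # Alternative algorithm: instead of scanning every odd number in [start, stop), enumerate the numbers whose
-- # digits are all odd directly, digit by digit, in increasing order, and keep those in range.
--
-- def _walk(prefix, k, start, stop):
--     if k == 0:
--         if start <= prefix < stop: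
--             yield prefix
--     else:
--         for d in (1, 3, 5, 7, 9):
--             yield from _walk(prefix * 10 + d, k - 1, start, stop)
--
-- def _repunit(k):
--     return (10 ** k - 1) // 9
--
-- def odd_gen(start, stop):
--     k = 1
--     while _repunit(k) < stop:
--         yield from _walk(0, k, start, stop)
--         k += 1
-- ===== Notes on version B (the rewrite author's own statement) =====
-- stated objective: alternative
-- what changed: Instead of scanning every odd number in [start, stop) and string-testing its digits, B enumerates the all-odd-digit numbers themselves digit by digit (5 choices per digit) in increasing order and keeps those inside the range; cost depends on the digit count of stop, not on the width of the range.
import Mathlib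
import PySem

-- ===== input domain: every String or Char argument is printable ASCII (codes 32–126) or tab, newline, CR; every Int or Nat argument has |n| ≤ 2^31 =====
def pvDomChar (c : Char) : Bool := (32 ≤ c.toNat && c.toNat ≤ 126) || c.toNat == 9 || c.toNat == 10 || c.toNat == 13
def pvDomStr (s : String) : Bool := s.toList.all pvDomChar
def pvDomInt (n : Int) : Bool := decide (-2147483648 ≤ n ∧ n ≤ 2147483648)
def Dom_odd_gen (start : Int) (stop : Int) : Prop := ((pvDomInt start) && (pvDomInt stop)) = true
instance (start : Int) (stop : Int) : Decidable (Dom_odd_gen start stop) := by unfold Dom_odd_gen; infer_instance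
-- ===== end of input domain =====

-- B replaces A's scan of every odd number in [start, stop) by a digit-by-digit enumeration
-- of the all-odd-digit numbers themselves, in increasing order (objective: alternative
-- algorithm; its cost depends on the digit count of stop, not on the range width).
-- A is a generator; the equivalence is about the list of yielded values.

-- ===== PORT A =====

-- for char in str(num): if int(char) % 2 == 0: return False / return True
-- (none = the ValueError Python raises on int('-'); unreachable under Pre_)
def allOddChars : List Char → Option Bool
  | [] => some true
  | c :: cs =>
    match PySem.Int.ofChars? [c] with
    | none => none
    | some v => if PySem.Int.mod v 2 = 0 then some false else allOddChars cs

def all_odd_digits (num : Int) : Option Bool := allOddChars (PySem.Int.toChars num)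

-- while current_num < stop: …; current_num += 2   (fuel (stop - c).toNat bounds the
-- number of iterations; when it runs out the loop guard is already false)
def oddGenLoop (stop : Int) : Nat → Int → List Int
  | 0, _ => []
  | fuel + 1, cur =>
    if cur < stop then
      match all_odd_digits cur with
      | some true => cur :: oddGenLoop stop fuel (cur + 2)
      | _ => oddGenLoop stop fuel (cur + 2)
    else []

def odd_gen (start : Int) (stop : Int) : List Int :=
  let c := if PySem.Int.mod start 2 = 0 then start + 1 else start
  oddGenLoop stop (stop - c).toNat c

-- ===== PORT B =====

-- _walk(prefix, k, start, stop): append k more digits from (1,3,5,7,9)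
def bWalk (pref : Int) (k : Nat) (start stop : Int) : List Int :=
  match k with
  | 0 => if start ≤ pref ∧ pref < stop then [pref] else []
  | k + 1 => ([1, 3, 5, 7, 9] : List Int).flatMap (fun d => bWalk (pref * 10 + d) k start stop)

-- _repunit(k) = (10 ** k - 1) // 9
def bRepunit (k : Nat) : Int := PySem.Int.floordiv (10 ^ k - 1) 9

-- k = 1; while _repunit(k) < stop: yield from _walk(0, k, start, stop); k += 1
-- (fuel stop.toNat bounds the iterations: _repunit(k) ≥ k, so the guard fails by then)
def bLoop (start stop : Int) : Nat → Nat → List Int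
  | 0, _ => []
  | fuel + 1, k =>
    if bRepunit k < stop then bWalk 0 k start stop ++ bLoop start stop fuel (k + 1) else []

def odd_gen_alt (start : Int) (stop : Int) : List Int := bLoop start stop stop.toNat 1

-- ===== PRECONDITION & SPEC =====

-- Pre_ excludes exactly the inputs on which A raises ValueError: a negative scan value
-- reaches int('-') on the sign character of str(current_num).
def Pre_odd_gen (start : Int) (stop : Int) : Prop :=
  0 ≤ start ∨ stop ≤ (if PySem.Int.mod start 2 = 0 then start + 1 else start)
instance (start : Int) (stop : Int) : Decidable (Pre_odd_gen start stop) := by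
  unfold Pre_odd_gen; infer_instance

def pvWitness_odd_gen : Int × Int := (1, 40)

def Spec_odd_gen (start : Int) (stop : Int) (out : List Int) : Prop := out = odd_gen_alt start stop
instance (start : Int) (stop : Int) (out : List Int) : Decidable (Spec_odd_gen start stop out) := by
  unfold Spec_odd_gen; infer_instance

-- ===== CLAIM (what is proved, stated in full; the proofs are below) =====
def Claim_equal_odd_gen : Prop := ∀ (start : Int) (stop : Int), Dom_odd_gen start stop → Pre_odd_gen start stop → Spec_odd_gen start stop (odd_gen start stop)

-- ===== LEMMAS AND PROOFS =====

-- the canonical predicate: n ≥ 1 with all decimal digits odd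
def goodN : Nat → Bool
  | n =>
    if h : n < 10 then decide (n % 2 = 1)
    else ((n % 10) % 2 == 1) && goodN (n / 10)
decreasing_by exact Nat.div_lt_self (by omega) (by omega)

def good (n : Int) : Bool := decide (1 ≤ n) && goodN n.toNat

def canonical (start stop : Int) : List Int := (PySem.List.pyRange start stop 1).filter good

-- number of decimal digits
def digLen : Nat → Nat
  | n => if h : n < 10 then 1 else digLen (n / 10) + 1
decreasing_by exact Nat.div_lt_self (by omega) (by omega)

-- "the k lowest digit positions of n are odd" (digit at position j is n / 10^j % 10)
def lowOdd : Nat → Int → Prop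
  | 0, _ => True
  | k + 1, n => (n / 10 ^ k) % 10 % 2 = 1 ∧ lowOdd k n

lemma ediv_eq_iff' {a q b : Int} (hb : 0 < b) : a / b = q ↔ q * b ≤ a ∧ a < (q + 1) * b := by
  constructor
  · rintro rfl
    exact ⟨(Int.le_ediv_iff_mul_le hb).mp le_rfl,
      (Int.ediv_lt_iff_lt_mul hb).mp (lt_add_one (a / b))⟩
  · rintro ⟨h1, h2⟩
    have hq : q ≤ a / b := (Int.le_ediv_iff_mul_le hb).mpr h1
    have hq2 : a / b < q + 1 := (Int.ediv_lt_iff_lt_mul hb).mpr (by linarith)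
    omega

lemma ediv_pow_succ (a : Int) (k : Nat) : a / 10 ^ (k + 1) = a / 10 / 10 ^ k := by
  rw [Int.ediv_ediv_of_nonneg (by norm_num), pow_succ, mul_comm (10 ^ k) 10]

lemma nine_dvd_pow_sub_one (k : Nat) : (9 : Int) ∣ 10 ^ k - 1 := by
  induction k with
  | zero => simp
  | succ k ih =>
    obtain ⟨c, hc⟩ := ih
    exact ⟨10 * c + 1, by rw [pow_succ]; linarith⟩

lemma bRepunit_mul (k : Nat) : 9 * bRepunit k = 10 ^ k - 1 := by
  unfold bRepunit
  rw [PySem.Int.floordiv_eq_ediv_of_pos (by norm_num)]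
  exact Int.mul_ediv_cancel' (nine_dvd_pow_sub_one k)

lemma bRepunit_succ (k : Nat) : bRepunit (k + 1) = 10 * bRepunit k + 1 := by
  have h1 := bRepunit_mul k
  have h2 := bRepunit_mul (k + 1)
  have : (9 : Int) * bRepunit (k + 1) = 9 * (10 * bRepunit k + 1) := by
    rw [h2, pow_succ]; linarith
  omega

lemma bRepunit_ge (k : Nat) : (k : Int) ≤ bRepunit k := by
  induction k with
  | zero => simp [bRepunit, PySem.Int.floordiv]
  | succ k ih => rw [bRepunit_succ]; push_cast; omega

lemma bRepunit_mono {j k : Nat} (h : j ≤ k) : bRepunit j ≤ bRepunit k := by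
  induction k with
  | zero =>
    have : j = 0 := Nat.le_zero.mp h
    simp [this]
  | succ k ih =>
    rcases Nat.lt_or_ge j (k + 1) with h' | h'
    · have := ih (by omega)
      have hk := bRepunit_ge k
      rw [bRepunit_succ]; omega
    · have : j = k + 1 := by omega
      subst this; rfl

-- ----- bridge: A's string test computes goodN -----

lemma allOddChars_append (xs ys : List Char) :
    allOddChars (xs ++ ys) =
      match allOddChars xs with
      | some true => allOddChars ys
      | r => r := by
  induction xs with
  | nil => simp [allOddChars]
  | cons c cs ih =>
    rcases h : PySem.Int.ofChars? [c] with _ | v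
    · simp [allOddChars, h]
    · simp only [List.cons_append, allOddChars, h]
      split
      · rfl
      · exact ih

lemma allOddChars_digit (d : Nat) (h : d < 10) :
    allOddChars [Nat.digitChar d] = some (decide (d % 2 = 1)) := by
  interval_cases d <;> decide

lemma bridgeN (m : Nat) (hm : 1 ≤ m) : allOddChars (Nat.toDigits 10 m) = some (goodN m) := by
  induction m using Nat.strong_induction_on with
  | _ m ih =>
    by_cases h10 : m < 10
    · rw [Nat.toDigits_of_lt_base h10, allOddChars_digit m h10]
      rw [goodN]; simp [h10]
    · rw [Nat.toDigits_of_base_le (by omega) (by omega), allOddChars_append]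
      have hdiv : 1 ≤ m / 10 := Nat.one_le_div_iff (by omega) |>.mpr (by omega)
      rw [ih (m / 10) (Nat.div_lt_self (by omega) (by omega)) hdiv]
      rw [allOddChars_digit (m % 10) (Nat.mod_lt _ (by omega))]
      conv_rhs => rw [goodN]
      rw [dif_neg h10]
      cases hg : goodN (m / 10) <;> simp [Bool.and_comm] <;>
        try (rcases Nat.mod_two_eq_zero_or_one m with hp | hp <;> simp [hp])

lemma bridge (n : Int) (hn : 1 ≤ n) : all_odd_digits n = some (good n) := by
  unfold all_odd_digits good
  have h0 : ¬ n < 0 := by omega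
  simp only [PySem.Int.toChars, h0, if_false]
  rw [bridgeN n.toNat (by omega)]
  simp [hn]

lemma good_even (n : Int) (h : n % 2 = 0) : good n = false := by
  unfold good
  by_cases h1 : 1 ≤ n
  · have hm : n.toNat % 2 = 0 := by omega
    rw [goodN]
    by_cases h10 : n.toNat < 10
    · simp [h10]; omega
    · have : n.toNat % 10 % 2 = 0 := by omega
      simp [h10, this]
  · simp [h1]

-- ----- A = canonical -----

lemma oddGenLoop_eq (stop : Int) (fuel : Nat) :
    ∀ cur : Int, 1 ≤ cur → cur % 2 = 1 → stop - cur ≤ fuel →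
      oddGenLoop stop fuel cur = canonical cur stop := by
  induction fuel with
  | zero =>
    intro cur _ _ hf
    rw [oddGenLoop, canonical, PySem.List.pyRange_one_eq_nil (by omega)]
    rfl
  | succ fuel ih =>
    intro cur h1 h2 hf
    rw [oddGenLoop]
    by_cases hlt : cur < stop
    · simp only [hlt, if_true]
      rw [bridge cur h1]
      have hrec : oddGenLoop stop fuel (cur + 2) = canonical (cur + 2) stop :=
        ih (cur + 2) (by omega) (by omega) (by omega)
      have htail : canonical (cur + 1) stop = canonical (cur + 2) stop := by
        by_cases h' : cur + 1 < stop
        · rw [canonical, PySem.List.pyRange_one_cons h', List.filter_cons,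
            good_even (cur + 1) (by omega)]
          have h2' : cur + 1 + 1 = cur + 2 := by ring
          rw [h2']
          rfl
        · rw [canonical, canonical, PySem.List.pyRange_one_eq_nil (by omega),
            PySem.List.pyRange_one_eq_nil (by omega)]
      rw [canonical, PySem.List.pyRange_one_cons hlt, List.filter_cons]
      cases hg : good cur <;> rw [hrec, ← htail] <;> rfl
    · simp only [hlt, if_false]
      rw [canonical, PySem.List.pyRange_one_eq_nil (by omega)]
      rfl

lemma odd_gen_eq_canonical (start stop : Int) (hpre : Pre_odd_gen start stop) :
    odd_gen start stop = canonical start stop := by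
  unfold Pre_odd_gen at hpre
  have hmod := PySem.Int.mod_two_eq start
  have hcodd : (if PySem.Int.mod start 2 = 0 then start + 1 else start) % 2 = 1 ∧
      start ≤ (if PySem.Int.mod start 2 = 0 then start + 1 else start) ∧
      (if PySem.Int.mod start 2 = 0 then start + 1 else start) ≤ start + 1 := by
    by_cases h : PySem.Int.mod start 2 = 0 <;> simp [h] <;> omega
  show oddGenLoop stop (stop - (if PySem.Int.mod start 2 = 0 then start + 1 else start)).toNat
      (if PySem.Int.mod start 2 = 0 then start + 1 else start) = canonical start stop
  generalize hgen : (if PySem.Int.mod start 2 = 0 then start + 1 else start) = c at hpre hcodd ⊢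
  obtain ⟨hodd, hsc, hcs⟩ := hcodd
  rcases hpre with hpos | hstop
  · -- start ≥ 0: loop from c, then extend the range down to start
    have h1c : 1 ≤ c := by omega
    rw [oddGenLoop_eq stop (stop - c).toNat c h1c hodd (by omega)]
    by_cases hcl : c < stop
    · rw [canonical, canonical,
        PySem.List.pyRange_one_append start c stop (by omega) (by omega),
        List.filter_append]
      have hhead : List.filter good (PySem.List.pyRange start c 1) = [] := by
        rcases eq_or_lt_of_le hsc with h | h
        · rw [← h, PySem.List.pyRange_one_eq_nil (by omega)]; rfl
        · have hcs1 : c = start + 1 := by omega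
          rw [hcs1, PySem.List.pyRange_one_singleton]
          simp [List.filter, good_even start (by omega)]
      rw [hhead]; rfl
    · rw [canonical, canonical, PySem.List.pyRange_one_eq_nil (by omega)]
      have hfil : ∀ n ∈ PySem.List.pyRange start stop 1, ¬ (good n = true) := by
        intro n hn
        rw [PySem.List.mem_pyRange_one] at hn
        have : n = start ∧ start % 2 = 0 := by omega
        rw [this.1, good_even start this.2]
        simp
      rw [List.filter_eq_nil_iff.mpr hfil]
      rfl
  · -- stop ≤ c: both sides are empty
    have hz : (stop - c).toNat = 0 := by omega
    rw [hz, oddGenLoop, canonical]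
    have hfil : ∀ n ∈ PySem.List.pyRange start stop 1, ¬ (good n = true) := by
      intro n hn
      rw [PySem.List.mem_pyRange_one] at hn
      have hns : n = start ∧ start % 2 = 0 := by omega
      rw [hns.1, good_even start hns.2]
      simp
    rw [List.filter_eq_nil_iff.mpr hfil]

-- ----- B = canonical -----

lemma lowOdd_succ (k : Nat) (n : Int) :
    lowOdd (k + 1) n = ((n / 10 ^ k) % 10 % 2 = 1 ∧ lowOdd k n) := rfl

lemma ediv_pow_succ' (a : Int) (k : Nat) : a / 10 ^ (k + 1) = a / 10 ^ k / 10 := by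
  rw [Int.ediv_ediv_of_nonneg (by positivity), ← pow_succ]

lemma bWalk_mem (s t : Int) (k : Nat) :
    ∀ p n : Int, 0 ≤ p →
      (n ∈ bWalk p k s t ↔ s ≤ n ∧ n < t ∧ n / 10 ^ k = p ∧ lowOdd k n) := by
  induction k with
  | zero =>
    intro p n hp
    show n ∈ (if s ≤ p ∧ p < t then [p] else []) ↔ _
    split_ifs with h
    · simp only [List.mem_singleton, pow_zero, Int.ediv_one, lowOdd, and_true]
      constructor
      · rintro rfl; exact ⟨h.1, h.2, rfl⟩
      · rintro ⟨_, _, rfl⟩; rfl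
    · simp only [List.not_mem_nil, false_iff, pow_zero, Int.ediv_one, lowOdd, and_true]
      rintro ⟨h1, h2, rfl⟩
      exact h ⟨h1, h2⟩
  | succ k ih =>
    intro p n hp
    show n ∈ ([1, 3, 5, 7, 9] : List Int).flatMap (fun d => bWalk (p * 10 + d) k s t) ↔ _
    rw [List.mem_flatMap, lowOdd_succ]
    constructor
    · rintro ⟨d, hd, hmem⟩
      have hdp : 1 ≤ d ∧ d ≤ 9 ∧ d % 2 = 1 := by
        simp only [List.mem_cons, List.not_mem_nil, or_false] at hd
        rcases hd with rfl | rfl | rfl | rfl | rfl <;> norm_num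
      obtain ⟨hs, ht, hq, hlow⟩ := (ih (p * 10 + d) n (by omega)).mp hmem
      refine ⟨hs, ht, ?_, ?_, hlow⟩
      · rw [ediv_pow_succ', hq]; omega
      · rw [hq]; omega
    · rintro ⟨hs, ht, hdiv, hd1, hlk⟩
      rw [ediv_pow_succ'] at hdiv
      refine ⟨n / 10 ^ k % 10, ?_, (ih (p * 10 + n / 10 ^ k % 10) n (by omega)).mpr
        ⟨hs, ht, by omega, hlk⟩⟩
      simp only [List.mem_cons, List.not_mem_nil, or_false]
      omega

lemma lowOdd_ge (k : Nat) (n : Int) (h0 : 0 ≤ n) (h : lowOdd (k + 1) n) : 10 ^ k ≤ n := by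
  rcases h with ⟨hd, _⟩
  by_contra hlt
  rw [Int.ediv_eq_zero_of_lt h0 (by omega)] at hd
  simp at hd

lemma bWalk_bounds (s t : Int) (k : Nat) (p n : Int) (hp : 0 ≤ p)
    (h : n ∈ bWalk p k s t) : p * 10 ^ k ≤ n ∧ n < (p + 1) * 10 ^ k := by
  obtain ⟨_, _, hdiv, _⟩ := (bWalk_mem s t k p n hp).mp h
  exact (ediv_eq_iff' (by positivity)).mp hdiv

lemma bWalk_pairwise (s t : Int) (k : Nat) :
    ∀ p : Int, 0 ≤ p → (bWalk p k s t).Pairwise (· < ·) := by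
  induction k with
  | zero =>
    intro p _
    show ((if s ≤ p ∧ p < t then [p] else []) : List Int).Pairwise (· < ·)
    split_ifs <;> simp
  | succ k ih =>
    intro p hp
    show (([1, 3, 5, 7, 9] : List Int).flatMap (fun d => bWalk (p * 10 + d) k s t)).Pairwise (· < ·)
    rw [List.pairwise_flatMap]
    constructor
    · intro d hd
      have : 1 ≤ d := by
        simp only [List.mem_cons, List.not_mem_nil, or_false] at hd
        rcases hd with rfl | rfl | rfl | rfl | rfl <;> norm_num
      exact ih (p * 10 + d) (by omega)
    · have hcross : ∀ d d' : Int, 1 ≤ d → d < d' → ∀ x ∈ bWalk (p * 10 + d) k s t,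
          ∀ y ∈ bWalk (p * 10 + d') k s t, x < y := by
        intro d d' h1 hdd x hx y hy
        have hbx := bWalk_bounds s t k _ x (by omega) hx
        have hby := bWalk_bounds s t k _ y (by omega) hy
        have hpow : (0 : Int) < 10 ^ k := by positivity
        nlinarith [hbx.2, hby.1]
      simp only [List.pairwise_cons, List.mem_cons, List.not_mem_nil, or_false,
        List.Pairwise.nil, and_true]
      repeat' apply And.intro
      all_goals
        first
          | exact List.Pairwise.nil
          | (intro d' hd'
             refine hcross _ _ (by norm_num) ?_
             rcases hd' with rfl | rfl | rfl | rfl <;> norm_num)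

lemma bLoop_mem (s t : Int) (fuel : Nat) :
    ∀ k : Nat, 1 ≤ k → ∀ n : Int,
      (n ∈ bLoop s t fuel k ↔ ∃ j : Nat, k ≤ j ∧ j < k + fuel ∧ bRepunit j < t ∧ n ∈ bWalk 0 j s t) := by
  induction fuel with
  | zero =>
    intro k _ n
    rw [bLoop]
    simp only [List.not_mem_nil, false_iff, not_exists]
    rintro j ⟨hj1, hj2, _⟩
    omega
  | succ fuel ih =>
    intro k hk n
    rw [bLoop]
    split_ifs with hrep
    · rw [List.mem_append, ih (k + 1) (by omega) n]
      constructor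
      · rintro (hw | ⟨j, hj1, hj2, hjt, hw⟩)
        · exact ⟨k, le_refl k, by omega, hrep, hw⟩
        · exact ⟨j, by omega, by omega, hjt, hw⟩
      · rintro ⟨j, hj1, hj2, hjt, hw⟩
        rcases eq_or_lt_of_le hj1 with rfl | hlt
        · exact Or.inl hw
        · exact Or.inr ⟨j, by omega, by omega, hjt, hw⟩
    · simp only [List.not_mem_nil, false_iff, not_exists]
      rintro j ⟨hj1, _, hjt, _⟩
      have := bRepunit_mono hj1
      omega

lemma mem_bWalk_zero_bounds (s t : Int) (j : Nat) (hj : 1 ≤ j) (y : Int)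
    (hy : y ∈ bWalk 0 j s t) : 10 ^ (j - 1) ≤ y ∧ y < 10 ^ j := by
  obtain ⟨_, _, hdiv, hlow⟩ := (bWalk_mem s t j 0 y le_rfl).mp hy
  have hpow : (0 : Int) < 10 ^ j := by positivity
  have hy0 : 0 ≤ y := by
    by_contra hneg
    have := Int.ediv_neg_of_neg_of_pos (by omega : y < 0) hpow
    omega
  have hub : y < 10 ^ j := by
    have := (ediv_eq_iff' hpow).mp hdiv
    omega
  obtain ⟨j', rfl⟩ : ∃ j', j = j' + 1 := ⟨j - 1, by omega⟩
  exact ⟨by simpa using lowOdd_ge j' y hy0 hlow, hub⟩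

lemma bLoop_pairwise (s t : Int) (fuel : Nat) :
    ∀ k : Nat, 1 ≤ k → (bLoop s t fuel k).Pairwise (· < ·) := by
  induction fuel with
  | zero => intro k _; rw [bLoop]; exact List.Pairwise.nil
  | succ fuel ih =>
    intro k hk
    rw [bLoop]
    split_ifs with hrep
    · rw [List.pairwise_append]
      refine ⟨bWalk_pairwise s t k 0 le_rfl, ih (k + 1) (by omega), ?_⟩
      intro x hx y hy
      obtain ⟨j, hj1, _, _, hyw⟩ := (bLoop_mem s t fuel (k + 1) (by omega) y).mp hy
      have hxb := mem_bWalk_zero_bounds s t k hk x hx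
      have hyb := mem_bWalk_zero_bounds s t j (by omega) y hyw
      have hmono : (10 : Int) ^ k ≤ 10 ^ (j - 1) := pow_le_pow_right₀ (by norm_num) (by omega)
      omega
    · exact List.Pairwise.nil

lemma lowOdd_succ_iff (k : Nat) : ∀ n : Int, lowOdd (k + 1) n ↔ n % 10 % 2 = 1 ∧ lowOdd k (n / 10) := by
  induction k with
  | zero => intro n; simp [lowOdd]
  | succ k ih =>
    intro n
    show (n / 10 ^ (k+1)) % 10 % 2 = 1 ∧ lowOdd (k+1) n ↔ _
    rw [ih n, ediv_pow_succ]
    show _ ↔ n % 10 % 2 = 1 ∧ ((n / 10 / 10 ^ k) % 10 % 2 = 1 ∧ lowOdd k (n / 10))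
    tauto

lemma digLen_bounds (m : Nat) (hm : 1 ≤ m) :
    10 ^ (digLen m - 1) ≤ m ∧ m < 10 ^ digLen m ∧ 1 ≤ digLen m := by
  induction m using Nat.strong_induction_on with
  | _ m ih =>
    by_cases h10 : m < 10
    · rw [digLen, dif_pos h10]
      simp only [Nat.sub_self, pow_zero, pow_one]
      omega
    · rw [digLen, dif_neg h10]
      have hdiv : 1 ≤ m / 10 := (Nat.one_le_div_iff (by omega)).mpr (by omega)
      obtain ⟨hlo, hhi, hone⟩ := ih (m / 10) (Nat.div_lt_self (by omega) (by omega)) hdiv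
      set L := digLen (m / 10) with hL
      refine ⟨?_, ?_, by omega⟩
      · have : 10 ^ (L + 1 - 1) = 10 * 10 ^ (L - 1) := by
          rw [Nat.add_sub_cancel, ← pow_succ']
          congr 1
          omega
        rw [this]
        omega
      · have : 10 ^ (L + 1) = 10 * 10 ^ L := by rw [pow_succ']
        rw [this]
        omega

lemma digLen_eq (m : Nat) (k : Nat) (hk : 1 ≤ k) (h1 : 10 ^ (k - 1) ≤ m) (h2 : m < 10 ^ k) :
    digLen m = k := by
  have hm : 1 ≤ m := le_trans (Nat.one_le_pow _ _ (by omega)) h1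
  obtain ⟨hlo, hhi, hone⟩ := digLen_bounds m hm
  rcases lt_trichotomy (digLen m) k with h | h | h
  · have : (10 : Nat) ^ digLen m ≤ 10 ^ (k - 1) := Nat.pow_le_pow_right (by omega) (by omega)
    omega
  · exact h
  · have : (10 : Nat) ^ k ≤ 10 ^ (digLen m - 1) := Nat.pow_le_pow_right (by omega) (by omega)
    omega

lemma goodN_iff_lowOdd (m : Nat) (hm : 1 ≤ m) :
    (goodN m = true ↔ lowOdd (digLen m) (m : Int)) := by
  induction m using Nat.strong_induction_on with
  | _ m ih =>
    by_cases h10 : m < 10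
    · rw [digLen, dif_pos h10, goodN, dif_pos h10, lowOdd_succ]
      simp only [lowOdd, and_true, pow_zero, Int.ediv_one, decide_eq_true_eq]
      omega
    · rw [digLen, dif_neg h10, goodN, dif_neg h10, lowOdd_succ_iff]
      have hdiv : 1 ≤ m / 10 := (Nat.one_le_div_iff (by omega)).mpr (by omega)
      have hcast : (m : Int) / 10 = ((m / 10 : Nat) : Int) := by push_cast; rfl
      rw [hcast, ← ih (m / 10) (Nat.div_lt_self (by omega) (by omega)) hdiv]
      simp only [Bool.and_eq_true, beq_iff_eq]
      constructor
      · rintro ⟨h1, h2⟩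
        exact ⟨by omega, h2⟩
      · rintro ⟨h1, h2⟩
        exact ⟨by omega, h2⟩

lemma bRepunit_zero : bRepunit 0 = 0 := by decide

lemma goodN_repunit_le (m : Nat) (hm : 1 ≤ m) (hg : goodN m = true) :
    bRepunit (digLen m) ≤ (m : Int) := by
  induction m using Nat.strong_induction_on with
  | _ m ih =>
    by_cases h10 : m < 10
    · rw [digLen, dif_pos h10, bRepunit_succ, bRepunit_zero]
      omega
    · rw [digLen, dif_neg h10, bRepunit_succ]
      have hdiv : 1 ≤ m / 10 := (Nat.one_le_div_iff (by omega)).mpr (by omega)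
      rw [goodN, dif_neg h10] at hg
      simp only [Bool.and_eq_true, beq_iff_eq] at hg
      have hrec := ih (m / 10) (Nat.div_lt_self (by omega) (by omega)) hdiv hg.2
      have hlast : 1 ≤ m % 10 := by omega
      omega

lemma alt_mem (s t n : Int) : n ∈ odd_gen_alt s t ↔ s ≤ n ∧ n < t ∧ good n = true := by
  unfold odd_gen_alt
  rw [bLoop_mem s t t.toNat 1 le_rfl n]
  constructor
  · rintro ⟨j, hj1, _, hjt, hw⟩
    obtain ⟨hs, ht, hdiv, hlow⟩ := (bWalk_mem s t j 0 n le_rfl).mp hw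
    obtain ⟨hlb, hub⟩ := mem_bWalk_zero_bounds s t j hj1 n hw
    have hpow : (0 : Int) < 10 ^ (j - 1) := by positivity
    have hn1 : 1 ≤ n := by omega
    have hdl : digLen n.toNat = j := by
      apply digLen_eq n.toNat j hj1
      · have : ((10 : Nat) ^ (j - 1) : Int) = (10 : Int) ^ (j - 1) := by push_cast; rfl
        omega
      · have : ((10 : Nat) ^ j : Int) = (10 : Int) ^ j := by push_cast; rfl
        omega
    refine ⟨hs, ht, ?_⟩
    unfold good
    have hgood : goodN n.toNat = true := by
      rw [goodN_iff_lowOdd n.toNat (by omega), hdl, Int.toNat_of_nonneg (by omega)]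
      exact hlow
    simp [hn1, hgood]
  · rintro ⟨hs, ht, hg⟩
    unfold good at hg
    simp only [Bool.and_eq_true, decide_eq_true_eq] at hg
    obtain ⟨hn1, hgood⟩ := hg
    obtain ⟨hlo, hhi, hone⟩ := digLen_bounds n.toNat (by omega)
    set j := digLen n.toNat with hj
    have hcast : n = ((n.toNat : Nat) : Int) := (Int.toNat_of_nonneg (by omega)).symm
    have hrep : bRepunit j ≤ n := by
      have h2 := goodN_repunit_le n.toNat (by omega) hgood
      rw [Int.toNat_of_nonneg (by omega : (0:Int) ≤ n)] at h2
      exact h2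
    have hcastp : ((10 : Nat) ^ j : Int) = (10 : Int) ^ j := by push_cast; rfl
    refine ⟨j, hone, ?_, by omega, (bWalk_mem s t j 0 n le_rfl).mpr ⟨hs, ht, ?_, ?_⟩⟩
    · have := bRepunit_ge j
      omega
    · exact Int.ediv_eq_zero_of_lt (by omega) (by omega)
    · rw [hcast]
      exact (goodN_iff_lowOdd n.toNat (by omega)).mp hgood

lemma alt_eq_canonical (s t : Int) : odd_gen_alt s t = canonical s t := by
  have hap : (odd_gen_alt s t).Pairwise (· < ·) := bLoop_pairwise s t t.toNat 1 le_rfl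
  have hcp : (canonical s t).Pairwise (· < ·) :=
    List.Pairwise.filter good (PySem.List.pairwise_lt_pyRange_one s t)
  have hmem : ∀ a : Int, a ∈ odd_gen_alt s t ↔ a ∈ canonical s t := by
    intro a
    rw [alt_mem, canonical, List.mem_filter, PySem.List.mem_pyRange_one]
    tauto
  have hperm : (odd_gen_alt s t).Perm (canonical s t) :=
    (List.perm_ext_iff_of_nodup (hap.imp ne_of_lt) (hcp.imp ne_of_lt)).mpr hmem
  exact PySem.List.eq_of_perm_of_pairwise_le_of_injective (fun x => x) (fun _ _ h => h)
    hperm (hap.imp le_of_lt) (hcp.imp le_of_lt)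

-- ===== VERDICT =====
theorem odd_gen_spec : Claim_equal_odd_gen := by
  intro start stop _ hpre
  unfold Spec_odd_gen
  rw [odd_gen_eq_canonical start stop hpre, alt_eq_canonical]
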